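-- pv_equiv track=rewrite | github.com/qihong007/leetcode | 2020_03_30.py | fast
-- ===== SOURCE A (Python) =====
-- def fast(num):
--     newstr = bin(num)[2:]
--     i = 0
--     for char in newstr:
--         if char == "1":
--             i = i + 1
--     if i == len(newstr):
--         return True
--     else:
--         return False
-- ===== SOURCE B (Python) =====
-- def fast(num):
--     return num > 0 and (num & (num + 1)) == 0
-- ===== Notes on version B (the rewrite author's own statement) =====
-- stated objective: simpler
-- what changed: Replaces building the binary string with bin() and counting '1' characters in a loop by a single closed-form bit test for positivity and the all-ones pattern (num & (num + 1) vanishing).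
import Mathlib
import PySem

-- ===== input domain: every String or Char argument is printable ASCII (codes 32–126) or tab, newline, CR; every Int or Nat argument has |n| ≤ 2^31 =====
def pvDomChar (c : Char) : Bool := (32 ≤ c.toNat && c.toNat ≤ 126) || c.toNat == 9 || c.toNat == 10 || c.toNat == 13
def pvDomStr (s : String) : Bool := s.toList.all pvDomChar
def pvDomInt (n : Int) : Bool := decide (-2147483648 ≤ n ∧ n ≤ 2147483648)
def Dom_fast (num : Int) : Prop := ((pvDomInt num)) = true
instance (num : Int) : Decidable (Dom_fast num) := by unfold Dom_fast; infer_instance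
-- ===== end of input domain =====

-- B replaces A's binary-string construction and '1'-count loop by the closed-form
-- bit test `num > 0 and (num & (num + 1)) == 0` (simpler, no string/loop).


-- ===== PORT A =====
-- newstr = bin(num)[2:]; count '1' chars; True iff count == len(newstr)
def fast (num : Int) : Bool :=
  let newstr : List Char := PySem.List.slice (PySem.Int.pyBin num).toList (some 2)
  let i : Int := newstr.foldl (fun i c => if c == '1' then i + 1 else i) 0
  if i = PySem.List.len newstr then true else false

-- ===== PORT B =====
-- return num > 0 and (num & (num + 1)) == 0
def fast_alt (num : Int) : Bool :=
  decide (0 < num) && (PySem.Int.band num (num + 1) == 0)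

-- ===== PRECONDITION & SPEC =====
def Spec_fast (num : Int) (out : Bool) : Prop := out = fast_alt num
instance (num : Int) (out : Bool) : Decidable (Spec_fast num out) := by unfold Spec_fast; infer_instance

-- ===== CLAIM (what is proved, stated in full; the proofs are below) =====
def Claim_equal_fast : Prop := ∀ (num : Int), Dom_fast num → Spec_fast num (fast num)

-- ===== LEMMAS AND PROOFS =====

/-- Structural (front-to-back) form of the binary digit characters of a positive `n`. -/
def binChars (n : Nat) : List Char :=
  if n < 2 then [Nat.digitChar n]
  else binChars (n / 2) ++ [Nat.digitChar (n % 2)]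
decreasing_by exact Nat.div_lt_self (by omega) (by omega)

lemma binChars_step (n : Nat) (h2 : ¬ n < 2) :
    binChars n = binChars (n / 2) ++ [Nat.digitChar (n % 2)] := by
  conv_lhs => rw [binChars]
  rw [if_neg h2]

lemma toDigitsCore_eq_binChars :
    ∀ (f n : Nat) (acc : List Char), 0 < n → n < f →
      Nat.toDigitsCore 2 f n acc = binChars n ++ acc := by
  intro f
  induction f with
  | zero => intro n acc _ h; omega
  | succ f ih =>
    intro n acc hn hf
    by_cases h2 : n < 2
    · have hn1 : n = 1 := by omega
      subst hn1
      simp [Nat.toDigitsCore, binChars]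
    · have hd : ¬ n / 2 = 0 := by omega
      have hlt : n / 2 < n := Nat.div_lt_self (by omega) (by omega)
      rw [show Nat.toDigitsCore 2 (f + 1) n acc
            = Nat.toDigitsCore 2 f (n / 2) ((n % 2).digitChar :: acc) by
            simp [Nat.toDigitsCore, hd]]
      rw [ih (n / 2) ((n % 2).digitChar :: acc) (by omega) (by omega)]
      rw [binChars_step n h2]
      simp

lemma toDigits_eq_binChars (n : Nat) (hn : 0 < n) :
    Nat.toDigits 2 n = binChars n := by
  have := toDigitsCore_eq_binChars (n + 1) n [] hn (by omega)
  simpa [Nat.toDigits] using this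

/-- The all-ones bit test: for `0 < n`, `n &&& (n+1) = 0` peels one bit. -/
lemma land_succ_step (n : Nat) (hn : 0 < n) :
    (n &&& (n + 1) = 0) ↔ (n % 2 = 1 ∧ (n / 2) &&& (n / 2 + 1) = 0) := by
  rcases Nat.even_or_odd n with he | ho
  · -- n even, n = 2*m with m > 0: n &&& (n+1) = 2*m ≠ 0
    obtain ⟨m, hm⟩ := he
    have hm' : n = 2 * m := by omega
    have hmpos : 0 < m := by omega
    have hb : n &&& (n + 1) = Nat.bit false m &&& Nat.bit true m := by
      simp [Nat.bit, hm']
    rw [hb, Nat.land_bit, Nat.and_self]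
    simp [Nat.bit]
    omega
  · -- n odd, n = 2*m+1: n &&& (n+1) = 2*(m &&& (m+1))
    obtain ⟨m, hm⟩ := ho
    have hm2 : n / 2 = m := by omega
    have hb : n &&& (n + 1) = Nat.bit true m &&& Nat.bit false (m + 1) := by
      simp [Nat.bit, hm]; ring_nf
    rw [hb, Nat.land_bit, hm2]
    simp [Nat.bit]
    omega

lemma digitChar_mod_two_eq_one (n : Nat) :
    ((Nat.digitChar (n % 2) == '1') = true) ↔ n % 2 = 1 := by
  rcases Nat.mod_two_eq_zero_or_one n with h | h <;> rw [h] <;> decide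

/-- Core characterisation: the binary digits of `n > 0` are all `'1'` iff `n &&& (n+1) = 0`. -/
lemma binChars_all_ones (n : Nat) (hn : 0 < n) :
    ((binChars n).countP (· == '1') = (binChars n).length) ↔ (n &&& (n + 1) = 0) := by
  induction n using Nat.strong_induction_on with
  | _ n ih =>
    rw [List.countP_eq_length, land_succ_step n hn]
    by_cases h2 : n < 2
    · have hn1 : n = 1 := by omega
      subst hn1
      simp [binChars, Nat.digitChar]
    · rw [binChars_step n h2]
      have hdiv : 0 < n / 2 := by omega
      have hlt : n / 2 < n := Nat.div_lt_self (by omega) (by omega)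
      have hrec := ih (n / 2) hlt hdiv
      rw [List.countP_eq_length] at hrec
      constructor
      · intro h
        have hall : ∀ a ∈ binChars (n / 2), (a == '1') = true := by
          intro a ha; exact h a (by simp [ha])
        have hone : (Nat.digitChar (n % 2) == '1') = true := h _ (by simp)
        exact ⟨(digitChar_mod_two_eq_one n).mp hone, hrec.mp hall⟩
      · intro ⟨hmod, h⟩
        have hall := hrec.mpr h
        intro a ha
        rcases List.mem_append.mp ha with hmem | hmem
        · exact hall a hmem
        · simp at hmem
          subst hmem
          exact (digitChar_mod_two_eq_one n).mpr hmod

lemma fast_pos (num : Int) (hpos : 0 < num) : fast num = fast_alt num := by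
  have hn0 : ¬ num < 0 := by omega
  have hnat : 0 < num.toNat := by omega
  unfold fast fast_alt
  rw [PySem.Int.toList_pyBin]
  rw [show PySem.Int.toBinChars0b num = '0' :: 'b' :: Nat.toDigits 2 num.toNat by
        simp [PySem.Int.toBinChars0b, hn0]]
  rw [PySem.List.slice_from _ (by norm_num : (0:Int) ≤ 2)]
  rw [show ((2:Int)).toNat = 2 from rfl]
  simp only [List.drop_succ_cons, List.drop_zero,
    PySem.List.foldl_count_if, PySem.List.len_eq, zero_add]
  rw [toDigits_eq_binChars num.toNat hnat]
  have hiff := binChars_all_ones num.toNat hnat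
  have hband : PySem.Int.band num (num + 1)
      = ((num.toNat &&& (num.toNat + 1) : Nat) : Int) := by
    rw [PySem.Int.band_of_nonneg (by omega) (by omega)]
    congr 2
    omega
  rw [hband]
  by_cases h : num.toNat &&& (num.toNat + 1) = 0
  · have hc : (binChars num.toNat).countP (· == '1') = (binChars num.toNat).length :=
      hiff.mpr h
    rw [if_pos (by exact_mod_cast hc)]
    simp [h, hpos]
  · have hc : ¬ (((binChars num.toNat).countP (· == '1') : Nat) : Int)
        = (((binChars num.toNat).length : Nat) : Int) := by
      intro hc'
      exact h (hiff.mp (by exact_mod_cast hc'))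
    rw [if_neg hc]
    simp [h]

lemma fast_neg (num : Int) (hneg : num < 0) : fast num = fast_alt num := by
  unfold fast fast_alt
  rw [PySem.Int.toList_pyBin]
  rw [show PySem.Int.toBinChars0b num
        = '-' :: '0' :: 'b' :: Nat.toDigits 2 num.natAbs by
        simp [PySem.Int.toBinChars0b, hneg]]
  rw [PySem.List.slice_from _ (by norm_num : (0:Int) ≤ 2)]
  rw [show ((2:Int)).toNat = 2 from rfl]
  simp only [List.drop_succ_cons, List.drop_zero,
    PySem.List.foldl_count_if, PySem.List.len_eq, zero_add]
  have hle := List.countP_le_length (p := (· == '1')) (l := Nat.toDigits 2 num.natAbs)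
  have key : ¬ ((('b' :: Nat.toDigits 2 num.natAbs).countP (· == '1') : Nat) : Int)
      = ((('b' :: Nat.toDigits 2 num.natAbs).length : Nat) : Int) := by
    intro hc
    have hc' : ('b' :: Nat.toDigits 2 num.natAbs).countP (· == '1')
        = ('b' :: Nat.toDigits 2 num.natAbs).length := by exact_mod_cast hc
    simp at hc'
    omega
  rw [if_neg key]
  have hnpos : ¬ 0 < num := by omega
  simp [hnpos]

-- ===== VERDICT (by name: the statement is the Claim_ definition above) =====
theorem fast_spec : Claim_equal_fast := by
  intro num _
  unfold Spec_fast
  rcases lt_trichotomy num 0 with h | h | h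
  · exact fast_neg num h
  · subst h; decide
  · exact fast_pos num h
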